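-- pv_equiv track=rewrite | github.com/LinuxUserLost/PyChi-aiN | pagepack_chitsheet/glossary_page/glossary_page.py | _remove_named_section
-- ===== SOURCE A (Python) =====
-- def _remove_named_section(text: str, start_marker: str, end_marker: str) -> str:
--     lines = text.splitlines()
--     out: list[str] = []
--     inside = False
--     for line in lines:
--         stripped = line.strip()
--         if stripped == start_marker:
--             inside = True
--             continue
--         if inside and stripped == end_marker:
--             inside = False
--             continue
--         if not inside:
--             out.append(line)
--     return "\n".join(out).strip()
-- ===== SOURCE B (Python) =====
-- def _remove_named_section(text: str, start_marker: str, end_marker: str) -> str: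
--     it = iter(text.splitlines())
--     out: list[str] = []
--     for line in it:
--         if line.strip() == start_marker:
--             # consume the section with a nested loop instead of a flag
--             for inner in it:
--                 s = inner.strip()
--                 if s == start_marker:
--                     continue
--                 if s == end_marker:
--                     break
--         else:
--             out.append(line)
--     return "\n".join(out).strip()
-- ===== Notes on version B (the rewrite author's own statement) =====
-- stated objective: alternative
-- what changed: Replaces A's boolean 'inside' flag over one pass with a flagless decomposition: an outer loop over a shared iterator that, on a start marker, hands the iterator to a nested skip loop which consumes the section up to the end marker.
import Mathlib
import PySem

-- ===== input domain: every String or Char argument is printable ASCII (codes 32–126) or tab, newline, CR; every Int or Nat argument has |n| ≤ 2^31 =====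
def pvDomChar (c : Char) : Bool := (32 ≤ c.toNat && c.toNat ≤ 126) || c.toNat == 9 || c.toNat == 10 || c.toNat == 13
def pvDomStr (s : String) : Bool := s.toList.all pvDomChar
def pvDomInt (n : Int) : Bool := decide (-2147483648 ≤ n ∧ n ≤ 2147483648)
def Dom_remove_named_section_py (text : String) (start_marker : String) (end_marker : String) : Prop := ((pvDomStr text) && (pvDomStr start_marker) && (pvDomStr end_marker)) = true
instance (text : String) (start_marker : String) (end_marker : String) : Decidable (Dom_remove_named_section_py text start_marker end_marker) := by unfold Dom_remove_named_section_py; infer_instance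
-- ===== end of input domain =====

-- B replaces A's boolean 'inside' flag by a flagless decomposition: an outer loop that,
-- on a start marker, delegates to a nested skip loop consuming the section (objective: alternative).

-- ===== PORT A =====
-- A's loop body (one line, state = (out, inside)), used by a fold over the lines.
def pvStepA (sm em : String) (st : List String × Bool) (line : String) : List String × Bool :=
  let stripped := PySem.Str.strip line
  if stripped == sm then (st.1, true)
  else if st.2 && stripped == em then (st.1, false)
  else if !st.2 then (st.1 ++ [line], st.2)
  else st

def remove_named_section_py (text : String) (start_marker : String) (end_marker : String) : String :=
  let lines := PySem.Str.splitlines text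
  let r := lines.foldl (pvStepA start_marker end_marker) (([] : List String), false)
  PySem.Str.strip (PySem.Str.join "\n" r.1)

-- ===== PORT B =====
-- B's nested 'for inner in it' skip loop: returns the lines remaining after the break
-- (or [] if the iterator is exhausted).
def pvSkipSec (sm em : String) : List String → List String
  | [] => []
  | l :: rest =>
    let s := PySem.Str.strip l
    if s == sm then pvSkipSec sm em rest
    else if s == em then rest
    else pvSkipSec sm em rest

theorem pvSkipSec_length_le (sm em : String) (ls : List String) :
    (pvSkipSec sm em ls).length ≤ ls.length := by
  induction ls with
  | nil => simp [pvSkipSec]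
  | cons l rest ih =>
    simp only [pvSkipSec]
    split_ifs <;> simp <;> omega

-- B's outer 'for line in it' loop over the shared iterator.
def pvOuterB (sm em : String) : List String → List String
  | [] => []
  | l :: rest =>
    if PySem.Str.strip l == sm then pvOuterB sm em (pvSkipSec sm em rest)
    else l :: pvOuterB sm em rest
termination_by ls => ls.length
decreasing_by
  · exact Nat.lt_succ_of_le (pvSkipSec_length_le sm em rest)
  · simp

def remove_named_section_py_alt (text : String) (start_marker : String) (end_marker : String) : String :=
  PySem.Str.strip (PySem.Str.join "\n" (pvOuterB start_marker end_marker (PySem.Str.splitlines text)))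

-- ===== PRECONDITION & SPEC =====
def Spec_remove_named_section_py (text : String) (start_marker : String) (end_marker : String) (out : String) : Prop := out = remove_named_section_py_alt text start_marker end_marker
instance (text : String) (start_marker : String) (end_marker : String) (out : String) : Decidable (Spec_remove_named_section_py text start_marker end_marker out) := by unfold Spec_remove_named_section_py; infer_instance

-- ===== CLAIM (what is proved, stated in full; the proofs are below) =====
def Claim_equal_remove_named_section_py : Prop := ∀ (text : String) (start_marker : String) (end_marker : String), Dom_remove_named_section_py text start_marker end_marker → Spec_remove_named_section_py text start_marker end_marker (remove_named_section_py text start_marker end_marker)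

-- ===== LEMMAS AND PROOFS =====

-- With inside = true, A's fold behaves like B's skip loop followed by the inside = false fold.
theorem pvFold_true (sm em : String) (ls : List String) (out : List String) :
    (ls.foldl (pvStepA sm em) (out, true)).1
      = ((pvSkipSec sm em ls).foldl (pvStepA sm em) (out, false)).1 := by
  induction ls generalizing out with
  | nil => simp [pvSkipSec]
  | cons l rest ih =>
    simp only [List.foldl_cons, pvSkipSec, pvStepA]
    by_cases hs : PySem.Str.strip l == sm
    · simp [hs, ih]
    · by_cases he : PySem.Str.strip l == em
      · simp [hs, he]
      · simp [hs, he, ih]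

-- With inside = false, A's fold appends exactly B's outer-loop output.
theorem pvFold_false (sm em : String) (ls : List String) (out : List String) :
    (ls.foldl (pvStepA sm em) (out, false)).1 = out ++ pvOuterB sm em ls := by
  induction hn : ls.length using Nat.strong_induction_on generalizing ls out with
  | _ n ih =>
    match ls with
    | [] => simp [pvOuterB]
    | l :: rest =>
      simp only [List.foldl_cons, pvStepA, pvOuterB]
      by_cases hs : PySem.Str.strip l == sm
      · have hlen : (pvSkipSec sm em rest).length < n := by
          have := pvSkipSec_length_le sm em rest
          simp at hn; omega
        simp only [hs, if_true]
        rw [pvFold_true, ih _ hlen _ _ rfl]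
      · simp only [hs, Bool.false_and, Bool.not_false, Bool.false_eq_true, if_false, if_true]
        rw [ih (n - 1) (by simp at hn; omega) rest (out ++ [l]) (by simp at hn; omega)]
        simp

-- ===== VERDICT (by name: the statement is the Claim_ definition above) =====
theorem remove_named_section_py_spec : Claim_equal_remove_named_section_py := by
  intro text sm em _
  simp [Spec_remove_named_section_py, remove_named_section_py, remove_named_section_py_alt,
    pvFold_false]
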